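-- pv_equiv track=rewrite | github.com/Sunny1est/Uppa | src/reports_window.py | _aggregate_by_week
-- ===== SOURCE A (Python) =====
-- from typing import Dict, List, Tuple
--
-- def _aggregate_by_week(daily_data: Dict[str, int]) -> Dict[str, int]:
--     """Agrega dados diários em semanas"""
--     items = list(daily_data.items())
--     weeks = {}
--
--     for i in range(0, len(items), 7):
--         week_items = items[i:i+7]
--         week_label = f"Sem {(i // 7) + 1}"
--         weeks[week_label] = sum(v for _, v in week_items)
--
--     return weeks
-- ===== SOURCE B (Python) =====
-- def _aggregate_by_week(daily_data):
--     """Agrega dados diários em semanas"""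
--     weeks = {}
--     for index, value in enumerate(daily_data.values()):
--         label = f"Sem {index // 7 + 1}"
--         weeks[label] = weeks.get(label, 0) + value
--     return weeks
-- ===== Notes on version B (the rewrite author's own statement) =====
-- stated objective: alternative
-- what changed: Replaces A's chunked traversal (slice items[i:i+7] per range step and sum each slice) by a single flat pass over enumerate(values) that dispatches each value into its week bucket via weeks.get(label,0)+value.
import Mathlib
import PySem

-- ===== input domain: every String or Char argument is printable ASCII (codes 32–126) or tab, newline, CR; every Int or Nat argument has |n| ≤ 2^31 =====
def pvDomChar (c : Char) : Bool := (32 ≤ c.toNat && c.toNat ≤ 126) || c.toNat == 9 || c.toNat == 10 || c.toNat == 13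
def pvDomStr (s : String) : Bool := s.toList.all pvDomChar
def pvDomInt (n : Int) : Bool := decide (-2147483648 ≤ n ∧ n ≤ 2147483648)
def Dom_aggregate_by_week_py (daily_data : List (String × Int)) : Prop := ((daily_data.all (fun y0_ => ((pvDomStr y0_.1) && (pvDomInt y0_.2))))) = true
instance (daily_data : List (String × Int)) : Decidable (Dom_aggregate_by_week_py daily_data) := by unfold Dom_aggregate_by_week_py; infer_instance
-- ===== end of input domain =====

-- B replaces A's chunk-slice-and-sum traversal by a single flat grouping pass
-- over the enumerated values (alternative decomposition; same asymptotic cost).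


-- ===== PORT A =====
-- items = list(daily_data.items()); for i in range(0, len(items), 7):
--   weeks[f"Sem {i//7+1}"] = sum(v for _, v in items[i:i+7])
def aggregate_by_week_py (daily_data : List (String × Int)) : List (String × Int) :=
  let items := daily_data
  let weeks : PySem.Dict String Int :=
    (PySem.List.pyRange 0 (items.length : Int) 7).foldl
      (fun weeks i =>
        let week_items := PySem.List.slice items (some i) (some (i + 7))
        let week_label := "Sem " ++ PySem.Int.toStr (PySem.Int.floordiv i 7 + 1)
        weeks.insert week_label ((week_items.map (·.2)).sum))
      PySem.Dict.empty
  weeks.items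

-- ===== PORT B =====
-- for index, value in enumerate(daily_data.values()):
--   label = f"Sem {index//7+1}"; weeks[label] = weeks.get(label, 0) + value
def aggregate_by_week_py_alt (daily_data : List (String × Int)) : List (String × Int) :=
  let weeks : PySem.Dict String Int :=
    (PySem.List.enumerate (daily_data.map (·.2)) 0).foldl
      (fun weeks p =>
        let label := "Sem " ++ PySem.Int.toStr (PySem.Int.floordiv p.1 7 + 1)
        weeks.insert label (weeks.getD label 0 + p.2))
      PySem.Dict.empty
  weeks.items

-- ===== PRECONDITION & SPEC =====
def Spec_aggregate_by_week_py (daily_data : List (String × Int)) (out : List (String × Int)) : Prop := out = aggregate_by_week_py_alt daily_data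
instance (daily_data : List (String × Int)) (out : List (String × Int)) : Decidable (Spec_aggregate_by_week_py daily_data out) := by unfold Spec_aggregate_by_week_py; infer_instance

-- ===== CLAIM (what is proved, stated in full; the proofs are below) =====
def Claim_equal_aggregate_by_week_py : Prop := ∀ (daily_data : List (String × Int)), Dom_aggregate_by_week_py daily_data → Spec_aggregate_by_week_py daily_data (aggregate_by_week_py daily_data)

-- ===== LEMMAS AND PROOFS =====

-- decimal value of a digit string, used to invert Nat.toDigits
def pvVal10 (a : Nat) : List Char → Nat
  | [] => a
  | c :: cs => pvVal10 (10 * a + (c.toNat - 48)) cs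

def pvLabel (m : Int) : String := "Sem " ++ PySem.Int.toStr m

def pvBStep (w : PySem.Dict String Int) (p : Int × Int) : PySem.Dict String Int :=
  w.insert (pvLabel (PySem.Int.floordiv p.1 7 + 1)) (w.getD (pvLabel (PySem.Int.floordiv p.1 7 + 1)) 0 + p.2)

def pvAStep (items : List (String × Int)) (w : PySem.Dict String Int) (i : Int) : PySem.Dict String Int :=
  w.insert (pvLabel (PySem.Int.floordiv i 7 + 1))
    (((PySem.List.slice items (some i) (some (i + 7))).map (·.2)).sum)

-- the common result: one (label, chunk-sum) pair per block of 7 values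
def pvChunks : List Int → Nat → List (String × Int)
  | [], _ => []
  | v :: l, k => (pvLabel ((k : Int) + 1), v + (List.take 6 l).sum) :: pvChunks (List.drop 6 l) (k + 1)
  termination_by l _ => l.length
  decreasing_by simp

theorem pvVal10_acc (cs : List Char) : ∀ a : Nat, pvVal10 a cs = a * 10 ^ cs.length + pvVal10 0 cs := by
  induction cs with
  | nil => intro a; show a = a * 10 ^ 0 + 0; ring
  | cons c cs ih =>
    intro a
    show pvVal10 (10 * a + (c.toNat - 48)) cs
        = a * 10 ^ (cs.length + 1) + pvVal10 (10 * 0 + (c.toNat - 48)) cs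
    rw [ih (10 * a + (c.toNat - 48)), ih (10 * 0 + (c.toNat - 48))]
    ring

theorem pvToDigitsCore_val (f : Nat) : ∀ (n : Nat) (ds : List Char), n < f →
    pvVal10 0 (Nat.toDigitsCore 10 f n ds) = n * 10 ^ ds.length + pvVal10 0 ds := by
  induction f with
  | zero => intro n ds h; omega
  | succ f ih =>
    intro n ds h
    have hstep : Nat.toDigitsCore 10 (f + 1) n ds
        = if n / 10 = 0 then Nat.digitChar (n % 10) :: ds
          else Nat.toDigitsCore 10 f (n / 10) (Nat.digitChar (n % 10) :: ds) := rfl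
    have hdig : (Nat.digitChar (n % 10)).toNat - 48 = n % 10 := by
      have h10 : n % 10 < 10 := Nat.mod_lt _ (by norm_num)
      interval_cases h' : n % 10 <;> decide
    by_cases h0 : n / 10 = 0
    · have hn : n < 10 := by omega
      rw [hstep, if_pos h0]
      show pvVal10 (10 * 0 + ((Nat.digitChar (n % 10)).toNat - 48)) ds = n * 10 ^ ds.length + pvVal10 0 ds
      rw [pvVal10_acc]
      have hmod : n % 10 = n := Nat.mod_eq_of_lt hn
      rw [hdig, hmod]
      ring
    · have h10 : 10 ≤ n := by
        by_contra hc
        exact h0 (Nat.div_eq_of_lt (by omega))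
      have hlt : n / 10 < f := by
        have := Nat.div_lt_self (by omega : 0 < n) (by norm_num : 1 < 10)
        omega
      rw [hstep, if_neg h0]
      rw [ih (n / 10) (Nat.digitChar (n % 10) :: ds) hlt]
      show n / 10 * 10 ^ (Nat.digitChar (n % 10) :: ds).length + pvVal10 (10 * 0 + ((Nat.digitChar (n % 10)).toNat - 48)) ds
          = n * 10 ^ ds.length + pvVal10 0 ds
      rw [pvVal10_acc]
      have hsplit : 10 * (n / 10) + n % 10 = n := Nat.div_add_mod n 10
      show n / 10 * 10 ^ (ds.length + 1) + ((10 * 0 + ((Nat.digitChar (n % 10)).toNat - 48)) * 10 ^ ds.length + pvVal10 0 ds)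
          = n * 10 ^ ds.length + pvVal10 0 ds
      calc n / 10 * 10 ^ (ds.length + 1) + ((10 * 0 + ((Nat.digitChar (n % 10)).toNat - 48)) * 10 ^ ds.length + pvVal10 0 ds)
          = (10 * (n / 10) + ((Nat.digitChar (n % 10)).toNat - 48)) * 10 ^ ds.length + pvVal10 0 ds := by ring
        _ = n * 10 ^ ds.length + pvVal10 0 ds := by rw [hdig, hsplit]

theorem pvToDigits_inj {m n : Nat} (h : Nat.toDigits 10 m = Nat.toDigits 10 n) : m = n := by
  have hm := pvToDigitsCore_val (m + 1) m [] (by omega)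
  have hn := pvToDigitsCore_val (n + 1) n [] (by omega)
  have e : ∀ x : Nat, x * 10 ^ (([] : List Char)).length + pvVal10 0 [] = x := fun x => by
    show x * 10 ^ 0 + 0 = x; ring
  rw [e] at hm hn
  simp only [Nat.toDigits] at h
  rw [h, hn] at hm
  exact hm.symm

theorem pvToChars_nat (a : Nat) : PySem.Int.toChars ((a : Int) + 1) = Nat.toDigits 10 (a + 1) := by
  have h1 : ¬ ((a : Int) + 1 < 0) := by omega
  have h2 : ((a : Int) + 1).toNat = a + 1 := by omega
  simp [PySem.Int.toChars, h1, h2]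

theorem pvLabel_inj {a b : Nat} (h : pvLabel ((a : Int) + 1) = pvLabel ((b : Int) + 1)) : a = b := by
  have h' := congrArg String.toList h
  simp only [pvLabel, String.toList_append, PySem.Int.toList_toStr] at h'
  have h'' := List.append_cancel_left h'
  rw [pvToChars_nat, pvToChars_nat] at h''
  have := pvToDigits_inj h''
  omega

theorem pvRange7_nil (a b : Int) (h : b ≤ a) : PySem.List.pyRange a b 7 = [] := by
  rw [PySem.List.pyRange_of_pos a b (by norm_num)]
  simp [show ¬ (a < b) by omega]

theorem pvRange7_cons (a b : Int) (h : a < b) :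
    PySem.List.pyRange a b 7 = a :: PySem.List.pyRange (a + 7) b 7 := by
  rw [PySem.List.pyRange_of_pos a b (by norm_num), PySem.List.pyRange_of_pos (a + 7) b (by norm_num)]
  by_cases h7 : a + 7 < b
  · have hcnt : ((b - a + 7 - 1) / 7).toNat = ((b - (a + 7) + 7 - 1) / 7).toNat + 1 := by omega
    rw [if_pos h, if_pos h7, hcnt, List.range_succ_eq_map]
    simp [List.map_map, Function.comp]
    intro k _
    ring
  · have hcnt : ((b - a + 7 - 1) / 7).toNat = 1 := by omega
    rw [if_pos h, if_neg h7, hcnt]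
    simp

theorem pvFloordiv7 (k j : Nat) (hj : j < 7) :
    PySem.Int.floordiv ((7 * k + j : Nat) : Int) 7 = (k : Int) := by
  rw [PySem.Int.floordiv_eq_iff_of_pos (by norm_num)]
  push_cast
  omega

theorem pvChunks_eq (l : List Int) (k : Nat) (h : l ≠ []) :
    pvChunks l k = (pvLabel ((k : Int) + 1), (l.take 7).sum) :: pvChunks (l.drop 7) (k + 1) := by
  cases l with
  | nil => exact absurd rfl h
  | cons v rest =>
    show pvChunks (v :: rest) k = _
    rw [pvChunks]
    simp [List.sum_cons]

-- A's fold from block k, over a dict containing no label of a later block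
theorem pvA_main (items : List (String × Int)) (k : Nat) (w : PySem.Dict String Int)
    (hw : ∀ m : Nat, k < m → w.contains (pvLabel ((m : Int))) = false) :
    ((PySem.List.pyRange ((7 * k : Nat) : Int) (items.length : Int) 7).foldl (pvAStep items) w).items
      = w.items ++ pvChunks ((items.drop (7 * k)).map (·.2)) k := by
  by_cases hle : items.length ≤ 7 * k
  · rw [pvRange7_nil _ _ (by exact_mod_cast hle), List.foldl_nil]
    rw [List.drop_eq_nil_of_le hle]
    simp [pvChunks]
  · have hlt : ((7 * k : Nat) : Int) < (items.length : Int) := by exact_mod_cast Nat.lt_of_not_le (fun h => hle h)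
    rw [pvRange7_cons _ _ hlt, List.foldl_cons]
    have hstep : pvAStep items w ((7 * k : Nat) : Int)
        = w.insert (pvLabel ((k : Int) + 1)) ((((items.drop (7 * k)).take 7).map (·.2)).sum) := by
      show w.insert (pvLabel (PySem.Int.floordiv ((7 * k : Nat) : Int) 7 + 1)) _ = _
      have hf : PySem.Int.floordiv ((7 * k : Nat) : Int) 7 = (k : Int) := by
        have h := pvFloordiv7 k 0 (by omega)
        rwa [Nat.add_zero] at h
      rw [hf]
      have hsl : PySem.List.slice items (some ((7 * k : Nat) : Int)) (some (((7 * k : Nat) : Int) + 7))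
          = (items.drop (7 * k)).take 7 := by
        have h7 : ((7 * k : Nat) : Int) + 7 = ((7 * k : Nat) : Int) + ((7 : Nat) : Int) := by norm_num
        rw [h7, PySem.List.slice_natCast_add]
      rw [hsl]
    rw [hstep]
    have hfresh : w.contains (pvLabel ((k : Int) + 1)) = false := by
      have := hw (k + 1) (by omega)
      have hc : ((k + 1 : Nat) : Int) = (k : Int) + 1 := by push_cast; ring
      rwa [hc] at this
    have hnext : ((7 * k : Nat) : Int) + 7 = ((7 * (k + 1) : Nat) : Int) := by push_cast; ring
    rw [hnext]
    set w1 := w.insert (pvLabel ((k : Int) + 1)) ((((items.drop (7 * k)).take 7).map (·.2)).sum) with hw1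
    have hw1inv : ∀ m : Nat, k + 1 < m → w1.contains (pvLabel ((m : Int))) = false := by
      intro m hm
      rw [hw1, PySem.Dict.contains_insert]
      have h1 : w.contains (pvLabel ((m : Int))) = false := hw m (by omega)
      have h2 : pvLabel ((m : Int)) ≠ pvLabel ((k : Int) + 1) := by
        intro he
        have hm1 : ((m : Nat) : Int) = ((m - 1 : Nat) : Int) + 1 := by
          have : 1 ≤ m := by omega
          push_cast [this]
          omega
        rw [hm1] at he
        have := pvLabel_inj he
        omega
      rw [h1, beq_eq_false_iff_ne.mpr h2]
      rfl
    rw [pvA_main items (k + 1) w1 hw1inv]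
    rw [hw1, PySem.Dict.items_insert_of_not_contains w _ hfresh]
    have hchunks : pvChunks ((items.drop (7 * k)).map (·.2)) k
        = (pvLabel ((k : Int) + 1), ((((items.drop (7 * k)).take 7).map (·.2)).sum))
            :: pvChunks ((items.drop (7 * (k + 1))).map (·.2)) (k + 1) := by
      have hne : (items.drop (7 * k)).map (·.2) ≠ [] := by
        simp [List.drop_eq_nil_iff]
        omega
      rw [pvChunks_eq _ k hne]
      rw [← List.map_take, ← List.map_drop, List.drop_drop]
      have h77 : 7 * k + 7 = 7 * (k + 1) := by ring
      rw [h77]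
    rw [hchunks]
    simp
  termination_by items.length - 7 * k
  decreasing_by
    have : 7 * k < items.length := Nat.lt_of_not_le (fun h => hle h)
    omega

-- B's fold over one (possibly partial) week starting at index 7k+j
theorem pvB_week (l : List Int) (k : Nat) : ∀ (j : Nat) (w : PySem.Dict String Int), l ≠ [] → l.length + j ≤ 7 →
    (PySem.List.enumerate l ((7 * k + j : Nat) : Int)).foldl pvBStep w
      = w.insert (pvLabel ((k : Int) + 1)) (w.getD (pvLabel ((k : Int) + 1)) 0 + l.sum) := by
  induction l with
  | nil => intro j w hne _; exact absurd rfl hne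
  | cons v rest ih =>
    intro j w _ hlen
    have hj : j < 7 := by simp at hlen; omega
    rw [PySem.List.enumerate_cons, List.foldl_cons]
    have hstep : pvBStep w (((7 * k + j : Nat) : Int), v)
        = w.insert (pvLabel ((k : Int) + 1)) (w.getD (pvLabel ((k : Int) + 1)) 0 + v) := by
      show w.insert (pvLabel (PySem.Int.floordiv ((7 * k + j : Nat) : Int) 7 + 1)) _ = _
      rw [pvFloordiv7 k j hj]
    rw [hstep]
    cases rest with
    | nil =>
      rw [PySem.List.enumerate_nil, List.foldl_nil]
      simp
    | cons v' rest' =>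
      have hcast : ((7 * k + j : Nat) : Int) + 1 = ((7 * k + (j + 1) : Nat) : Int) := by push_cast; ring
      rw [hcast, ih (j + 1) _ (by simp) (by simp at hlen ⊢; omega)]
      rw [PySem.Dict.getD_insert_self, PySem.Dict.insert_insert_self]
      rw [add_assoc]
      simp

theorem pvB_main (l : List Int) (k : Nat) (w : PySem.Dict String Int)
    (hw : ∀ m : Nat, k < m → w.contains (pvLabel ((m : Int))) = false) :
    ((PySem.List.enumerate l ((7 * k : Nat) : Int)).foldl pvBStep w).items
      = w.items ++ pvChunks l k := by
  by_cases hnil : l = []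
  · subst hnil
    rw [PySem.List.enumerate_nil, List.foldl_nil]
    simp [pvChunks]
  · have hsplit : l = l.take 7 ++ l.drop 7 := (List.take_append_drop 7 l).symm
    have htne : l.take 7 ≠ [] := by
      cases l with
      | nil => exact absurd rfl hnil
      | cons v r => simp
    have htlen : (l.take 7).length ≤ 7 := by simp
    conv_lhs => rw [hsplit]
    rw [PySem.List.enumerate_append, List.foldl_append]
    have h70 : ((7 * k : Nat) : Int) = ((7 * k + 0 : Nat) : Int) := by norm_num
    rw [h70, pvB_week (l.take 7) k 0 w htne (by omega)]
    have hfresh : w.contains (pvLabel ((k : Int) + 1)) = false := by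
      have := hw (k + 1) (by omega)
      have hc : ((k + 1 : Nat) : Int) = (k : Int) + 1 := by push_cast; ring
      rwa [hc] at this
    rw [PySem.Dict.getD_of_not_contains w 0 hfresh, zero_add]
    by_cases hd : l.drop 7 = []
    · rw [hd, PySem.List.enumerate_nil, List.foldl_nil]
      rw [PySem.Dict.items_insert_of_not_contains w _ hfresh]
      rw [pvChunks_eq l k hnil, hd]
      simp [pvChunks]
    · have hlen7 : (l.take 7).length = 7 := by
        have : 7 < l.length := by
          by_contra hc
          exact hd (List.drop_eq_nil_of_le (by omega))
        simp [List.length_take]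
        omega
      have hstart : ((7 * k + 0 : Nat) : Int) + ((l.take 7).length : Int)
          = ((7 * (k + 1) : Nat) : Int) := by rw [hlen7]; push_cast; ring
      rw [hstart]
      set w1 := w.insert (pvLabel ((k : Int) + 1)) (l.take 7).sum with hw1
      have hw1inv : ∀ m : Nat, k + 1 < m → w1.contains (pvLabel ((m : Int))) = false := by
        intro m hm
        rw [hw1, PySem.Dict.contains_insert]
        have h1 : w.contains (pvLabel ((m : Int))) = false := hw m (by omega)
        have h2 : pvLabel ((m : Int)) ≠ pvLabel ((k : Int) + 1) := by
          intro he
          have hm1 : ((m : Nat) : Int) = ((m - 1 : Nat) : Int) + 1 := by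
            have : 1 ≤ m := by omega
            push_cast [this]
            omega
          rw [hm1] at he
          have := pvLabel_inj he
          omega
        rw [h1, beq_eq_false_iff_ne.mpr h2]
        rfl
      rw [pvB_main (l.drop 7) (k + 1) w1 hw1inv]
      rw [hw1, PySem.Dict.items_insert_of_not_contains w _ hfresh]
      rw [pvChunks_eq l k hnil]
      simp
  termination_by l.length
  decreasing_by
    have : 7 < l.length := by
      by_contra hc
      exact hd (List.drop_eq_nil_of_le (by omega))
    simp
    omega

-- ===== VERDICT (by name: the statement is the Claim_ definition above) =====
theorem pvEmptyInv : ∀ m : Nat, 0 < m → (PySem.Dict.empty : PySem.Dict String Int).contains (pvLabel ((m : Int))) = false := by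
  intro m _
  exact PySem.Dict.contains_empty _

theorem aggregate_by_week_py_spec : Claim_equal_aggregate_by_week_py := by
  intro l _
  show aggregate_by_week_py l = aggregate_by_week_py_alt l
  have e0 : ((7 * 0 : Nat) : Int) = 0 := by norm_num
  have hA : aggregate_by_week_py l
      = ((PySem.List.pyRange ((7 * 0 : Nat) : Int) (l.length : Int) 7).foldl (pvAStep l) PySem.Dict.empty).items := by
    show ((PySem.List.pyRange 0 (l.length : Int) 7).foldl (pvAStep l) PySem.Dict.empty).items = _
    rw [e0]
  have hB : aggregate_by_week_py_alt l
      = ((PySem.List.enumerate (l.map (·.2)) ((7 * 0 : Nat) : Int)).foldl pvBStep PySem.Dict.empty).items := by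
    show ((PySem.List.enumerate (l.map (·.2)) 0).foldl pvBStep PySem.Dict.empty).items = _
    rw [e0]
  rw [hA, hB, pvA_main l 0 PySem.Dict.empty pvEmptyInv, pvB_main (l.map (·.2)) 0 PySem.Dict.empty pvEmptyInv]
  simp
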